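-- pv_equiv track=rewrite | github.com/swarbricklab/qxub | qxub/cli.py | _sanitize_job_name
-- ===== SOURCE A (Python) =====
-- def _sanitize_job_name(name: str) -> str:
--     """Sanitize job name for PBS compliance.
--
--     PBS job names cannot contain certain characters like /, :, @, etc.
--     Replace problematic characters with safe alternatives.
--     """
--     if not name:
--         return name
--
--     # Replace problematic characters with safe alternatives
--     sanitized = name.replace("/", "_")  # Paths to underscores
--     sanitized = sanitized.replace(":", "_")  # Colons to underscores
--     sanitized = sanitized.replace(" ", "_")  # Spaces to underscores
--     sanitized = sanitized.replace("@", "_")  # At symbols to underscores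
--
--     # Remove any remaining non-alphanumeric characters except hyphens and underscores
--     sanitized = "".join(c for c in sanitized if c.isalnum() or c in "-_")
--
--     # Ensure it starts with a letter or number (not special character)
--     if sanitized and not sanitized[0].isalnum():
--         sanitized = "job_" + sanitized
--
--     # Limit length (PBS has limits on job name length)
--     if len(sanitized) > 50:
--         sanitized = sanitized[:47] + "..."
--
--     return sanitized or "job"  # Fallback if sanitization results in empty string
-- ===== SOURCE B (Python) =====
-- def _sanitize_job_name(name: str) -> str:
--     """Sanitize job name for PBS compliance, built in a single pass."""
--     if not name:
--         return name
--
--     out = []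
--     for c in name:
--         if c in "/: @":
--             out.append("_")
--         elif c.isalnum() or c in "-_":
--             out.append(c)
--     sanitized = "".join(out)
--
--     if sanitized and not sanitized[0].isalnum():
--         sanitized = "job_" + sanitized
--
--     if len(sanitized) > 50:
--         sanitized = sanitized[:47] + "..."
--
--     return sanitized or "job"
-- ===== Notes on version B (the rewrite author's own statement) =====
-- stated objective: simpler
-- what changed: Replaces the chain of four full-string .replace passes plus a separate filtering join by one single pass over the characters that translates, keeps or drops each character directly.
import Mathlib
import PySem

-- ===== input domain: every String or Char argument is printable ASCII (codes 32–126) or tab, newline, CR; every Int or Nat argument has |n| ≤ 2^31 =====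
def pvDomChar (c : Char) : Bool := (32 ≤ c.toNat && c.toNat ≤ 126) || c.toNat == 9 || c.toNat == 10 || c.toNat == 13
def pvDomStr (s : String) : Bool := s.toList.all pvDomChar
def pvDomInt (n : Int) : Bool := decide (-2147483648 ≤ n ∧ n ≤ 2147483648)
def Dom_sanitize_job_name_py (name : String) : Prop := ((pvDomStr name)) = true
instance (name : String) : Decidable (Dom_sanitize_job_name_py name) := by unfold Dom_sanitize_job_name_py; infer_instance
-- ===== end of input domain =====

-- B builds the sanitized string in one pass over the characters instead of A's four full .replace passes plus a filtering join; same tail logic, equal results proved.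


-- ===== PORT A =====
-- tail logic shared verbatim by both Pythons (prepend "job_", truncate, fallback)
def sanTail (s : List Char) : String :=
  let s1 := match PySem.List.pyGet? s 0 with
    | some c => if !PySem.Chars.isalnum c then "job_".toList ++ s else s
    | none => s
  let s2 := if s1.length > 50 then PySem.List.slice s1 none (some 47) ++ "...".toList else s1
  if s2.isEmpty then "job" else String.ofList s2

def sanitize_job_name_py (name : String) : String :=
  if name = "" then name
  else
    let s1 := PySem.Chars.replace name.toList ['/'] ['_']
    let s2 := PySem.Chars.replace s1 [':'] ['_']
    let s3 := PySem.Chars.replace s2 [' '] ['_']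
    let s4 := PySem.Chars.replace s3 ['@'] ['_']
    let s5 := s4.filter (fun c => PySem.Chars.isalnum c || c == '-' || c == '_')
    sanTail s5

-- ===== PORT B =====
-- one pass: each character is translated to '_', kept, or dropped
def sanOut : List Char → List Char
  | [] => []
  | c :: rest =>
    (if "/: @".toList.contains c then ['_']  -- `c in str` for a single char c is exactly membership
     else if PySem.Chars.isalnum c || "-_".toList.contains c then [c]
     else []) ++ sanOut rest

def sanitize_job_name_py_alt (name : String) : String :=
  if name = "" then name
  else sanTail (sanOut name.toList)

-- ===== PRECONDITION & SPEC =====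
def Spec_sanitize_job_name_py (name : String) (out : String) : Prop := out = sanitize_job_name_py_alt name
instance (name : String) (out : String) : Decidable (Spec_sanitize_job_name_py name out) := by unfold Spec_sanitize_job_name_py; infer_instance

-- ===== CLAIM (what is proved, stated in full; the proofs are below) =====
def Claim_equal_sanitize_job_name_py : Prop := ∀ (name : String), Dom_sanitize_job_name_py name → Spec_sanitize_job_name_py name (sanitize_job_name_py name)

-- ===== LEMMAS AND PROOFS =====

-- str.replace with a single-char pattern is a pointwise map
theorem replace_go_single (a b : Char) : ∀ (fuel : Nat) (l acc : List Char), l.length ≤ fuel →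
    PySem.Chars.replace.go [a] [b] fuel l acc
      = acc.reverse ++ l.map (fun c => if c = a then b else c) := by
  intro fuel
  induction fuel with
  | zero => intro l acc h; cases l with
    | nil => simp [PySem.Chars.replace.go]
    | cons c t => simp at h
  | succ n ih =>
    intro l acc h
    cases l with
    | nil => simp [PySem.Chars.replace.go]
    | cons c t =>
      simp only [PySem.Chars.replace.go, List.map_cons]
      by_cases hc : c = a
      · subst hc
        have : List.isPrefixOf [c] (c :: t) = true := by simp [List.isPrefixOf]
        rw [if_pos this]
        simp [ih t _ (by simpa using h)]
      · have : List.isPrefixOf [a] (c :: t) = false := by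
          simp [List.isPrefixOf]; exact fun h' => absurd h'.symm hc
        rw [if_neg (by simp [this]), ih t _ (by simpa using h)]
        simp [hc]

theorem replace_single (a b : Char) (l : List Char) :
    PySem.Chars.replace l [a] [b] = l.map (fun c => if c = a then b else c) := by
  simpa [PySem.Chars.replace] using replace_go_single a b l.length l [] le_rfl

-- the four-replace-then-filter pipeline equals B's single pass
theorem core_eq (l : List Char) :
    ((((l.map (fun c => if c = '/' then '_' else c)).map
        (fun c => if c = ':' then '_' else c)).map
        (fun c => if c = ' ' then '_' else c)).map
        (fun c => if c = '@' then '_' else c)).filter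
        (fun c => PySem.Chars.isalnum c || c == '-' || c == '_')
      = sanOut l := by
  induction l with
  | nil => simp [sanOut]
  | cons c t ih =>
    simp only [List.map_cons, List.filter_cons, sanOut, ← ih]
    by_cases h1 : c = '/' <;> by_cases h2 : c = ':' <;> by_cases h3 : c = ' ' <;>
      by_cases h4 : c = '@' <;>
      simp_all <;>
      by_cases h5 : PySem.Chars.isalnum c <;> by_cases h6 : c = '-' <;> by_cases h7 : c = '_' <;>
      simp_all

-- ===== VERDICT (by name: the statement is the Claim_ definition above) =====
theorem sanitize_job_name_py_spec : Claim_equal_sanitize_job_name_py := by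
  intro name _
  unfold Spec_sanitize_job_name_py sanitize_job_name_py sanitize_job_name_py_alt
  by_cases h : name = ""
  · simp [h]
  · simp only [if_neg h]
    rw [replace_single, replace_single, replace_single, replace_single, core_eq]
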